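-- pv_equiv track=rewrite | github.com/alxwen711/contestSubmissionArchive | codechef/starters 91/g.py | f
-- ===== SOURCE A (Python) =====
-- def f(cr,j,n):
--     best = max(j,n-j-1)
--     index = 0
--     v = j
--     t = -100
--     while index != n:
--         if t < cr[index][0]: t = cr[index][0] + 1
--         if cr[index][1] < j: v -= 1
--         elif cr[index][1] > j: v += 1
--         index += 1
--         if v > best: best = v
--     return best
-- ===== SOURCE B (Python) =====
-- def f(cr, j, n):
--     # Right-to-left scan: compute the maximum nonempty-prefix sum of the
--     # -1/0/+1 deltas via the suffix recurrence m = max(d, d + m), then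
--     # combine once with j and max(j, n - j - 1).
--     m = None
--     for i in reversed(range(n)):
--         c = cr[i][1]
--         d = -1 if c < j else (1 if c > j else 0)
--         m = d if m is None else max(d, d + m)
--     best = max(j, n - j - 1)
--     return best if m is None else max(best, j + m)
-- ===== Notes on version B (the rewrite author's own statement) =====
-- stated objective: alternative
-- what changed: B scans the array right-to-left, computing the maximum nonempty-prefix delta sum via the suffix recurrence m = max(d, d + m) (it maintains no running value and no running max), then combines it once with j and max(j, n-j-1); A's dead variable t is dropped.
import Mathlib
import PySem

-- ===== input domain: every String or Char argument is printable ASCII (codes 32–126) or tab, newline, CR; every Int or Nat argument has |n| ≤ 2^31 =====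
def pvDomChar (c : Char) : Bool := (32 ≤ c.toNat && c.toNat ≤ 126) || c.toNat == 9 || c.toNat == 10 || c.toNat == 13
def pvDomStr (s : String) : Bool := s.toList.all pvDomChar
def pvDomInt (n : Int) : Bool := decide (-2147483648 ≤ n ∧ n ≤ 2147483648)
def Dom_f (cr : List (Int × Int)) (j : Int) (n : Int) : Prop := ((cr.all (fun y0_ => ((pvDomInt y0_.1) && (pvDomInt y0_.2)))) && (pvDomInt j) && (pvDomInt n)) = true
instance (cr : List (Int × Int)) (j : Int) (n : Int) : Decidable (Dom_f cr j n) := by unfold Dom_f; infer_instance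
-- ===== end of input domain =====

-- B scans right-to-left computing the maximum nonempty-prefix delta sum via the suffix
-- recurrence m = max(d, d + m), then combines it once with j and max(j, n-j-1), instead of
-- A's left-to-right loop threading a running value and a running max (alternative algorithm;
-- A's dead variable t is dropped). Equivalence is proved on Pre_f (0 ≤ n ≤ len cr).

-- ===== PORT A =====
-- A's while loop runs index = 0,…,n-1 (inside Pre_f), threading state (t, v, best);
-- ported as a foldl over the first n elements of cr with the same state.
def f (cr : List (Int × Int)) (j : Int) (n : Int) : Int :=
  let best := max j (n - j - 1)
  ((cr.take n.toNat).foldl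
    (fun (st : Int × Int × Int) (p : Int × Int) =>
      let t := if st.1 < p.1 then p.1 + 1 else st.1
      let v := if p.2 < j then st.2.1 - 1 else if p.2 > j then st.2.1 + 1 else st.2.1
      let best := if v > st.2.2 then v else st.2.2
      (t, v, best))
    (-100, j, best)).2.2

-- ===== PORT B =====
-- Python's 'for i in reversed(range(n))' visits cr[n-1],…,cr[0]: ported as a foldl over
-- the reversed first-n-elements list, threading m : Option Int (None = no element seen yet).
def f_alt (cr : List (Int × Int)) (j : Int) (n : Int) : Int :=
  let m := (cr.take n.toNat).reverse.foldl
    (fun (m : Option Int) (p : Int × Int) =>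
      let d := if p.2 < j then (-1 : Int) else if p.2 > j then 1 else 0
      some (match m with | none => d | some m0 => max d (d + m0)))
    none
  let best := max j (n - j - 1)
  match m with
  | none => best
  | some m0 => max best (j + m0)

-- ===== PRECONDITION & SPEC =====
-- Pre_f: exactly the inputs on which Python A returns: for n < 0 or n > len(cr) A's loop
-- indexes past the end of cr and raises IndexError.
def Pre_f (cr : List (Int × Int)) (j : Int) (n : Int) : Prop := 0 ≤ n ∧ n ≤ cr.length
instance (cr : List (Int × Int)) (j : Int) (n : Int) : Decidable (Pre_f cr j n) := by unfold Pre_f; infer_instance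
def pvWitness_f : (List (Int × Int)) × Int × Int := ([(5, 2), (7, 0), (1, 3)], 1, 3)

def Spec_f (cr : List (Int × Int)) (j : Int) (n : Int) (out : Int) : Prop := out = f_alt cr j n
instance (cr : List (Int × Int)) (j : Int) (n : Int) (out : Int) : Decidable (Spec_f cr j n out) := by unfold Spec_f; infer_instance

-- ===== CLAIM (what is proved, stated in full; the proofs are below) =====
def Claim_equal_f : Prop := ∀ (cr : List (Int × Int)) (j : Int) (n : Int), Dom_f cr j n → Pre_f cr j n → Spec_f cr j n (f cr j n)

-- ===== LEMMAS AND PROOFS =====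

-- the trajectory of the running value along a list of deltas
def trajd : List Int → Int → List Int
  | [], _ => []
  | d :: ds, v => (v + d) :: trajd ds (v + d)

-- maximum nonempty-prefix sum of a delta list (none for the empty list)
def maxpref : List Int → Option Int
  | [] => none
  | d :: ds => some (match maxpref ds with | none => d | some m => max d (d + m))

-- A's fold computes the running max of the trajectory
theorem A_char (j : Int) (l : List (Int × Int)) : ∀ (t v best : Int),
    (l.foldl
      (fun (st : Int × Int × Int) (p : Int × Int) =>
      let t := if st.1 < p.1 then p.1 + 1 else st.1
      let v := if p.2 < j then st.2.1 - 1 else if p.2 > j then st.2.1 + 1 else st.2.1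
      let best := if v > st.2.2 then v else st.2.2
      (t, v, best))
      (t, v, best)).2.2
    = (trajd (l.map (fun p => if p.2 < j then (-1 : Int) else if p.2 > j then 1 else 0)) v).foldl
        max best := by
  induction l with
  | nil => intro t v best; simp [trajd]
  | cons p l ih =>
      intro t v best
      simp only [List.foldl, List.map, trajd]
      have hv : (if p.2 < j then v - 1 else if p.2 > j then v + 1 else v)
          = v + (if p.2 < j then (-1 : Int) else if p.2 > j then 1 else 0) := by
        split_ifs <;> omega
      rw [hv, ih]
      congr 1
      simp only [max_def]
      split_ifs <;> omega

-- B's right-to-left fold computes maxpref of the delta list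
theorem B_char (j : Int) (l : List (Int × Int)) :
    l.reverse.foldl
      (fun (m : Option Int) (p : Int × Int) =>
        let d := if p.2 < j then (-1 : Int) else if p.2 > j then 1 else 0
        some (match m with | none => d | some m0 => max d (d + m0)))
      none
    = maxpref (l.map (fun p => if p.2 < j then (-1 : Int) else if p.2 > j then 1 else 0)) := by
  induction l with
  | nil => simp [maxpref]
  | cons p l ih =>
      simp only [List.reverse_cons, List.foldl_append, List.foldl, List.map, maxpref, ih]

-- running max of the trajectory = seed max'ed with (start + maxpref of the deltas)
theorem traj_max_eq (ds : List Int) : ∀ (v best : Int),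
    (trajd ds v).foldl max best
    = match maxpref ds with | none => best | some m => max best (v + m) := by
  induction ds with
  | nil => intro v best; simp [trajd, maxpref]
  | cons d ds ih =>
      intro v best
      simp only [trajd, maxpref, List.foldl]
      rw [ih (v + d) (max best (v + d))]
      cases h : maxpref ds with
      | none => simp
      | some m =>
          simp only []
          have : v + max d (d + m) = max (v + d) (v + d + m) := by
            simp only [max_def]; split_ifs <;> omega
          rw [this, ← max_assoc]

-- ===== VERDICT (by name: the statements are the Claim_ definitions above) =====
theorem f_spec : Claim_equal_f := by
  intro cr j n _ _
  unfold Spec_f f f_alt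
  simp only []
  rw [A_char, B_char, traj_max_eq]
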